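-- pv_equiv track=rewrite | github.com/RaM2VaR/Application_mapp_GAT | utils/utils.py | create_mesh
-- ===== SOURCE A (Python) =====
-- def create_mesh(dimX, dimY):
--     nw_dict = {}
--     cords = []
--     for y in range(dimY):
--         for x in range(dimX):
--             cords.append((x, y))
--     for idx, line in enumerate(cords):
--         nw_dict[str(idx)] = {'cor': cords[idx]}
--     return nw_dict
-- ===== SOURCE B (Python) =====
-- def create_mesh(dimX, dimY):
--     if dimX <= 0 or dimY <= 0:
--         return {}
--     return {str(i): {'cor': (i % dimX, i // dimX)} for i in range(dimX * dimY)}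
-- ===== Notes on version B (the rewrite author's own statement) =====
-- stated objective: alternative
-- what changed: B replaces A's nested (y,x) loops plus a second enumerate pass over an intermediate cords list by a single flat loop over range(dimX*dimY) that computes each coordinate in closed form with divmod: index i maps to (i % dimX, i // dimX).
import Mathlib
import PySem

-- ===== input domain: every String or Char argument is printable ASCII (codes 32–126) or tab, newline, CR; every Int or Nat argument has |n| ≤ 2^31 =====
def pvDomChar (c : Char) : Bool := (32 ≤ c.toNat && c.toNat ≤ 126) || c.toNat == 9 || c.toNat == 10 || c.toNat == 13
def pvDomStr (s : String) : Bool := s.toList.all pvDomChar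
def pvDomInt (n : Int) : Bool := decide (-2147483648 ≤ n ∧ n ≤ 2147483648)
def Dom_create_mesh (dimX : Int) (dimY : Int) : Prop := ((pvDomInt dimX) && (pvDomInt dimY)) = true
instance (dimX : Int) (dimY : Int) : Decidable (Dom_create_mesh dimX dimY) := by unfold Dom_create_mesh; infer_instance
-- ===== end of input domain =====

-- B replaces A's nested loops + enumerate pass by one flat loop with closed-form divmod coordinates; objective: alternative.

-- ===== PORT A =====
-- literal port of A: build cords row by row, then a second loop over enumerate(cords)
-- inserting str(idx) -> {'cor': cords[idx]} (cords[idx] is always in range, ported as pyGetD).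
def create_mesh (dimX : Int) (dimY : Int) : List (String × List (String × Int × Int)) :=
  let cords : List (Int × Int) :=
    (PySem.List.pyRange 0 dimY 1).foldl (fun cords y =>
      (PySem.List.pyRange 0 dimX 1).foldl (fun cords x => cords ++ [(x, y)]) cords) []
  let nw_dict : PySem.Dict String (List (String × Int × Int)) :=
    (PySem.List.enumerate cords).foldl (fun d p =>
      d.insert (PySem.Int.toStr p.1) [("cor", PySem.List.pyGetD cords p.1 (0, 0))])
      PySem.Dict.empty
  nw_dict.items

-- ===== PORT B =====
-- literal port of B: empty-mesh guard, then one flat loop over range(dimX*dimY),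
-- coordinate of index i computed in closed form as (i % dimX, i // dimX).
def create_mesh_alt (dimX : Int) (dimY : Int) : List (String × List (String × Int × Int)) :=
  if dimX ≤ 0 ∨ dimY ≤ 0 then []
  else
    ((PySem.List.pyRange 0 (dimX * dimY) 1).foldl
      (fun d i => d.insert (PySem.Int.toStr i)
        [("cor", (PySem.Int.mod i dimX, PySem.Int.floordiv i dimX))])
      PySem.Dict.empty).items

-- ===== PRECONDITION & SPEC =====
def Spec_create_mesh (dimX : Int) (dimY : Int) (out : List (String × List (String × Int × Int))) : Prop := out = create_mesh_alt dimX dimY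
instance (dimX : Int) (dimY : Int) (out : List (String × List (String × Int × Int))) : Decidable (Spec_create_mesh dimX dimY out) := by unfold Spec_create_mesh; infer_instance

-- ===== CLAIM (what is proved, stated in full; the proofs are below) =====
def Claim_equal_create_mesh : Prop := ∀ (dimX : Int) (dimY : Int), Dom_create_mesh dimX dimY → Spec_create_mesh dimX dimY (create_mesh dimX dimY)

-- ===== LEMMAS AND PROOFS =====

-- the dict-building step shared in spirit by both loops: one (index, coordinate) pair
def pvStep (d : PySem.Dict String (List (String × Int × Int))) (p : Int × (Int × Int)) :
    PySem.Dict String (List (String × Int × Int)) :=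
  d.insert (PySem.Int.toStr p.1) [("cor", p.2)]

-- A's cords list is the flatMap of the rows
theorem pv_cords (dimX dimY : Int) :
    (PySem.List.pyRange 0 dimY 1).foldl (fun cords y =>
      (PySem.List.pyRange 0 dimX 1).foldl (fun cords x => cords ++ [(x, y)]) cords) []
      = (PySem.List.pyRange 0 dimY 1).flatMap
          (fun y => (PySem.List.pyRange 0 dimX 1).map (fun x => (x, y))) := by
  have h1 : ∀ (y : Int) (acc : List (Int × Int)),
      (PySem.List.pyRange 0 dimX 1).foldl (fun cords x => cords ++ [(x, y)]) acc
        = acc ++ (PySem.List.pyRange 0 dimX 1).map (fun x => (x, y)) := by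
    intro y acc
    rw [PySem.List.foldl_append_eq_flatMap (g := fun x => [(x, y)])]
    congr 1
    induction (PySem.List.pyRange 0 dimX 1) with
    | nil => rfl
    | cons a l ihl => simp [ihl]
  calc (PySem.List.pyRange 0 dimY 1).foldl (fun cords y =>
          (PySem.List.pyRange 0 dimX 1).foldl (fun cords x => cords ++ [(x, y)]) cords) []
      = (PySem.List.pyRange 0 dimY 1).foldl (fun cords y =>
          cords ++ (PySem.List.pyRange 0 dimX 1).map (fun x => (x, y))) [] := by
        apply PySem.List.foldl_congr_mem
        intro acc y _
        exact h1 y acc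
    _ = _ := by
        rw [PySem.List.foldl_append_eq_flatMap]; simp

-- one row, enumerated from start dimX*m, is exactly the divmod closed form on its index range
theorem pv_row (dimX : Int) (hX : 0 < dimX) (m : Nat) :
    PySem.List.enumerate ((PySem.List.pyRange 0 dimX 1).map (fun x => (x, (m : Int)))) (dimX * m)
      = (PySem.List.pyRange (dimX * m) (dimX * m + dimX) 1).map
          (fun i => (i, (PySem.Int.mod i dimX, PySem.Int.floordiv i dimX))) := by
  apply List.ext_getElem
  · simp [PySem.List.length_enumerate, PySem.List.length_pyRange_one]
  · intro k h1 h2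
    have hk : (k : Int) < dimX := by
      have := h1
      simp [PySem.List.length_enumerate, PySem.List.length_pyRange_one] at this
      omega
    have hklen : k < ((PySem.List.pyRange 0 dimX 1).map (fun x => (x, (m : Int)))).length := by
      simpa [PySem.List.length_enumerate] using h1
    rw [PySem.List.getElem_enumerate]
    simp only [List.getElem_map, PySem.List.getElem_pyRange_one]
    have hmod : PySem.Int.mod (dimX * m + k) dimX = (k : Int) := by
      rw [PySem.Int.mod_eq_emod_of_pos hX]
      rw [show dimX * (m : Int) + k = (k : Int) + dimX * m by ring,
        Int.add_mul_emod_self_left, Int.emod_eq_of_lt (by positivity) hk]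
    have hdiv : PySem.Int.floordiv (dimX * m + k) dimX = (m : Int) := by
      rw [PySem.Int.floordiv_eq_ediv_of_pos hX]
      have hne : dimX ≠ 0 := by omega
      have : (dimX * m + (k : Int)) = (k : Int) + dimX * m := by ring
      rw [this, Int.add_mul_ediv_left _ _ hne, Int.ediv_eq_zero_of_lt (by positivity) hk]
      simp
    simp only [zero_add]
    rw [hmod, hdiv]

-- the whole enumerated cords list is the divmod closed form over range(dimX*dimY)
theorem pv_enum (dimX : Int) (hX : 0 < dimX) (m : Nat) :
    PySem.List.enumerate ((PySem.List.pyRange 0 (m : Int) 1).flatMap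
        (fun y => (PySem.List.pyRange 0 dimX 1).map (fun x => (x, y)))) 0
      = (PySem.List.pyRange 0 (dimX * m) 1).map
          (fun i => (i, (PySem.Int.mod i dimX, PySem.Int.floordiv i dimX))) := by
  induction m with
  | zero => simp [PySem.List.pyRange_one_eq_nil]
  | succ n ih =>
    have hsr : PySem.List.pyRange 0 ((n : Int) + 1) 1
        = PySem.List.pyRange 0 (n : Int) 1 ++ [(n : Int)] :=
      PySem.List.pyRange_one_succ_right (by positivity)
    have hlen : (((PySem.List.pyRange 0 (n : Int) 1).flatMap
        (fun y => (PySem.List.pyRange 0 dimX 1).map (fun x => (x, y)))).length : Int)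
        = dimX * n := by
      have := congrArg List.length ih
      simp only [PySem.List.length_enumerate, List.length_map,
        PySem.List.length_pyRange_one] at this
      have hpos : 0 ≤ dimX * (n : Int) := by positivity
      omega
    have hsplit : PySem.List.pyRange 0 (dimX * ((n : Int) + 1)) 1
        = PySem.List.pyRange 0 (dimX * n) 1
          ++ PySem.List.pyRange (dimX * n) (dimX * n + dimX) 1 := by
      have h := PySem.List.pyRange_one_append 0 (dimX * n) (dimX * ((n : Int) + 1))
        (by positivity) (by nlinarith)
      rw [h]
      congr 1
      congr 1
      ring
    push_cast
    rw [hsr, List.flatMap_append, PySem.List.enumerate_append, ih, hsplit, List.map_append]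
    congr 1
    simp only [List.flatMap_cons, List.flatMap_nil, List.append_nil, zero_add]
    rw [hlen]
    exact pv_row dimX hX n

theorem create_mesh_spec : Claim_equal_create_mesh := by
  intro dimX dimY _
  unfold Spec_create_mesh create_mesh create_mesh_alt
  dsimp only
  rw [pv_cords]
  by_cases h : dimX ≤ 0 ∨ dimY ≤ 0
  · rw [if_pos h]
    have hnil : (PySem.List.pyRange 0 dimY 1).flatMap
        (fun y => (PySem.List.pyRange 0 dimX 1).map (fun x => (x, y))) = [] := by
      rcases h with h | h
      · simp [PySem.List.pyRange_one_eq_nil h, List.flatMap]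
      · simp [PySem.List.pyRange_one_eq_nil h]
    rw [hnil]
    simp [PySem.List.enumerate, PySem.Dict.empty]
  · rw [if_neg h]
    push Not at h
    obtain ⟨hX, hY⟩ := h
    congr 1
    -- A's second loop equals the fold of pvStep over the enumeration
    have hA : ∀ (cords : List (Int × Int)),
        (PySem.List.enumerate cords).foldl (fun d p =>
          d.insert (PySem.Int.toStr p.1) [("cor", PySem.List.pyGetD cords p.1 (0, 0))])
          PySem.Dict.empty
        = (PySem.List.enumerate cords).foldl pvStep PySem.Dict.empty := by
      intro cords
      apply PySem.List.foldl_congr_mem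
      intro d p hp
      rcases (PySem.List.mem_enumerate_iff _ _ _).1 hp with ⟨k, hk, rfl⟩
      simp [pvStep, PySem.List.pyGetD_natCast, hk]
    rw [hA]
    obtain ⟨n, rfl⟩ := Int.eq_ofNat_of_zero_le (le_of_lt hY)
    rw [pv_enum dimX hX n, List.foldl_map]
    rfl
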